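-- pv_equiv track=rewrite | github.com/guillaume-flambard/cobol-audit-tool | rules.py | check_dead_code
-- ===== SOURCE A (Python) =====
-- from typing import List, Dict, Any
--
-- def check_dead_code(lines: List[str]) -> List[str]:
--     """Détecte le code mort potentiel."""
--     dead_sections = []
--     current_section = None
--     has_entry_point = False
--
--     for line in lines:
--         if 'SECTION.' in line:
--             if current_section and not has_entry_point:
--                 dead_sections.append(current_section)
--             current_section = line
--             has_entry_point = False
--         elif current_section and ('PERFORM ' in line or 'GOTO ' in line):
--             has_entry_point = True
--
--     return dead_sections
-- ===== SOURCE B (Python) =====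
-- def check_dead_code(lines):
--     """Détecte le code mort potentiel (two-pass: index sections, then filter)."""
--     sections = []  # list of [header_line, has_entry_point]
--     for line in lines:
--         if 'SECTION.' in line:
--             sections.append([line, False])
--         elif sections and ('PERFORM ' in line or 'GOTO ' in line):
--             sections[-1][1] = True
--     return [header for header, flag in sections[:-1] if not flag]
-- ===== Notes on version B (the rewrite author's own statement) =====
-- stated objective: alternative
-- what changed: Replaces A's interleaved emit-previous-header-on-new-header state machine with a two-pass structure: first build a list of (header, has_entry_point) records, then filter the non-final records lacking an entry point.
import Mathlib
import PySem

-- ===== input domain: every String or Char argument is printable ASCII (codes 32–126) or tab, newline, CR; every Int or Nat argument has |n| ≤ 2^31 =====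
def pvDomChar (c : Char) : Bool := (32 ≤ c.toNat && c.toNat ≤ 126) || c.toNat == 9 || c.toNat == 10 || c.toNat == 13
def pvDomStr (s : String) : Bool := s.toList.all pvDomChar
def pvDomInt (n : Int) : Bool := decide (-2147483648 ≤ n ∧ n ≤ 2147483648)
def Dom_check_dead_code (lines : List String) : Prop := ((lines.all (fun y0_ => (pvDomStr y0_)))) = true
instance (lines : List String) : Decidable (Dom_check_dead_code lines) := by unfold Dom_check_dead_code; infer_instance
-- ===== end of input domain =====

-- B replaces A's interleaved emit-on-new-header state machine by a two-pass index-then-filter structure (objective: alternative).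

-- ===== PORT A =====
-- state = (dead_sections, current_section, has_entry_point); Python appends at the end.
-- 'if current_section and not has_entry_point': current_section is None or a line containing
-- 'SECTION.', hence truthy exactly when it is `some _` (such a line is never the empty string).
def cdcAStep (st : List String × Option String × Bool) (line : String) :
    List String × Option String × Bool :=
  match st with
  | (dead, cur, flag) =>
    if PySem.Str.isIn "SECTION." line then
      match cur, flag with
      | some c, false => (dead ++ [c], some line, false)
      | _, _ => (dead, some line, false)
    else if cur.isSome && (PySem.Str.isIn "PERFORM " line || PySem.Str.isIn "GOTO " line) then
      (dead, cur, true)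
    else (dead, cur, flag)

def check_dead_code (lines : List String) : List String :=
  (lines.foldl cdcAStep ([], none, false)).1

-- ===== PORT B =====
-- sections[-1][1] = True
def cdcSetLastTrue : List (String × Bool) → List (String × Bool)
  | [] => []
  | [p] => [(p.1, true)]
  | p :: ps => p :: cdcSetLastTrue ps

def cdcBStep (secs : List (String × Bool)) (line : String) : List (String × Bool) :=
  if PySem.Str.isIn "SECTION." line then secs ++ [(line, false)]
  else if !secs.isEmpty && (PySem.Str.isIn "PERFORM " line || PySem.Str.isIn "GOTO " line) then
    cdcSetLastTrue secs
  else secs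

def check_dead_code_alt (lines : List String) : List String :=
  ((lines.foldl cdcBStep []).dropLast.filter (fun p => !p.2)).map Prod.fst

-- ===== PRECONDITION & SPEC =====
def Spec_check_dead_code (lines : List String) (out : List String) : Prop := out = check_dead_code_alt lines
instance (lines : List String) (out : List String) : Decidable (Spec_check_dead_code lines out) := by unfold Spec_check_dead_code; infer_instance

-- ===== CLAIM (what is proved, stated in full; the proofs are below) =====
def Claim_equal_check_dead_code : Prop := ∀ (lines : List String), Dom_check_dead_code lines → Spec_check_dead_code lines (check_dead_code lines)

-- ===== LEMMAS AND PROOFS =====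

lemma cdcSetLastTrue_concat (S : List (String × Bool)) (c : String) (f : Bool) :
    cdcSetLastTrue (S ++ [(c, f)]) = S ++ [(c, true)] := by
  induction S with
  | nil => rfl
  | cons p ps ih =>
    cases ps with
    | nil => simp [cdcSetLastTrue]
    | cons q qs => simpa [cdcSetLastTrue] using ih

def cdcFinal (secs : List (String × Bool)) : List String :=
  (secs.dropLast.filter (fun p => !p.2)).map Prod.fst

-- loop invariant: A's fold from state (dead, some c, f) equals B's fold from S ++ [(c, f)],
-- where dead is exactly the non-final dead headers recorded in S.
lemma cdc_loop (lines : List String) (S : List (String × Bool)) (c : String) (f : Bool) :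
    (lines.foldl cdcAStep ((S.filter (fun p => !p.2)).map Prod.fst, some c, f)).1
      = cdcFinal (lines.foldl cdcBStep (S ++ [(c, f)])) := by
  induction lines generalizing S c f with
  | nil => simp [cdcFinal]
  | cons line rest ih =>
    by_cases h1 : PySem.Chars.isIn ['S','E','C','T','I','O','N','.'] line.toList = true
    · cases f with
      | false =>
        have := ih (S ++ [(c, false)]) line false
        simpa [cdcAStep, cdcBStep, h1] using this
      | true =>
        have := ih (S ++ [(c, true)]) line false
        simpa [cdcAStep, cdcBStep, h1] using this
    · by_cases hp : PySem.Chars.isIn ['P','E','R','F','O','R','M',' '] line.toList = true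
      · have := ih S c true
        simpa [cdcAStep, cdcBStep, h1, hp, cdcSetLastTrue_concat] using this
      · by_cases hg : PySem.Chars.isIn ['G','O','T','O',' '] line.toList = true
        · have := ih S c true
          simpa [cdcAStep, cdcBStep, h1, hp, hg, cdcSetLastTrue_concat] using this
        · have := ih S c f
          simpa [cdcAStep, cdcBStep, h1, hp, hg] using this

-- before the first header: A's state is ([], none, f) and B's sections list is empty.
lemma cdc_loop_none (lines : List String) (f : Bool) :
    (lines.foldl cdcAStep ([], none, f)).1 = cdcFinal (lines.foldl cdcBStep []) := by
  induction lines generalizing f with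
  | nil => rfl
  | cons line rest ih =>
    by_cases h1 : PySem.Chars.isIn ['S','E','C','T','I','O','N','.'] line.toList = true
    · have := cdc_loop rest [] line false
      simpa [cdcAStep, cdcBStep, h1] using this
    · simpa [cdcAStep, cdcBStep, h1] using ih f

-- ===== VERDICT (by name: the statement is the Claim_ definition above) =====
theorem check_dead_code_spec : Claim_equal_check_dead_code := by
  intro lines _
  unfold Spec_check_dead_code check_dead_code check_dead_code_alt
  simpa [cdcFinal] using cdc_loop_none lines false
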